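-- pv_equiv track=rewrite | github.com/abhaythakur754-0/parwa | backend/app/core/guardrails_integration.py | _get_safe_fallback_response
-- ===== SOURCE A (Python) =====
-- from typing import Any, Dict, List, Optional, TYPE_CHECKING
--
-- def _get_safe_fallback_response(blocked_reasons: List[str]) -> str:
--     """Generate a safe fallback response for blocked content.
--
--     This response is customer-facing and should be professional.
--     """
--     if any("hate_speech" in r.lower() or "violence" in r.lower()
--            for r in blocked_reasons):
--         return (
--             "I apologize, but I'm not able to provide a response to that request. "
--             "Please feel free to rephrase your question or ask about something else. "
--             "I'm here to help!")
--
--     if any("pii" in r.lower() for r in blocked_reasons):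
--         return (
--             "For your security, I've withheld some information from my response. "
--             "If you need specific details, please contact our support team directly. "
--             "How else can I assist you today?")
--
--     if any("policy" in r.lower() for r in blocked_reasons):
--         return (
--             "I'm not able to provide advice on that topic. "
--             "For specific guidance, please consult a qualified professional. "
--             "Is there something else I can help you with?"
--         )
--
--     # Generic safe response
--     return ("I apologize, but I'm unable to provide a complete response to your request. "
--             "Please try rephrasing your question, or contact our support team for further assistance.")
-- ===== SOURCE B (Python) =====
-- from typing import List
--
-- _MESSAGES = [
--     ("I apologize, but I'm not able to provide a response to that request. "
--      "Please feel free to rephrase your question or ask about something else. "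
--      "I'm here to help!"),
--     ("For your security, I've withheld some information from my response. "
--      "If you need specific details, please contact our support team directly. "
--      "How else can I assist you today?"),
--     ("I'm not able to provide advice on that topic. "
--      "For specific guidance, please consult a qualified professional. "
--      "Is there something else I can help you with?"),
--     ("I apologize, but I'm unable to provide a complete response to your request. "
--      "Please try rephrasing your question, or contact our support team for further assistance."),
-- ]
--
--
-- def _severity(reason: str) -> int:
--     """Rank a single reason: 0 harm, 1 pii, 2 policy, 3 other."""
--     low = reason.lower()
--     if "hate_speech" in low or "violence" in low:
--         return 0
--     if "pii" in low:
--         return 1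
--     if "policy" in low:
--         return 2
--     return 3
--
--
-- def _get_safe_fallback_response(blocked_reasons: List[str]) -> str:
--     # One pass: the most severe (smallest) rank seen decides the message.
--     best = 3
--     for r in blocked_reasons:
--         best = min(best, _severity(r))
--     return _MESSAGES[best]
-- ===== Notes on version B (the rewrite author's own statement) =====
-- stated objective: alternative
-- what changed: Instead of A's three staged any-scans over the whole list, B makes a single pass that classifies each reason into a numeric severity rank (0 harm, 1 pii, 2 policy, 3 other), folds the minimum rank, and indexes a message table with it.
import Mathlib
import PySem

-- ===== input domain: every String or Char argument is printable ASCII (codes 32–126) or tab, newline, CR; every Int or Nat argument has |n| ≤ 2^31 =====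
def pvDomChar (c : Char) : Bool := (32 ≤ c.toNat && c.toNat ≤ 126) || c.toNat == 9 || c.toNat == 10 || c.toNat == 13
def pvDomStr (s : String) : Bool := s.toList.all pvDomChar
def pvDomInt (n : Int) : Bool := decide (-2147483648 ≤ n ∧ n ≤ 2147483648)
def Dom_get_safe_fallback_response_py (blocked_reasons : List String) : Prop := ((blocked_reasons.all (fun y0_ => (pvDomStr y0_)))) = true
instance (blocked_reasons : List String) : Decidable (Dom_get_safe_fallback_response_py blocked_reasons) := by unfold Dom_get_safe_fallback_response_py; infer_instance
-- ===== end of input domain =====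

-- B replaces A's three staged any-scans by a single pass that ranks each reason's severity (0..3), folds the minimum, and indexes a message table (alternative decomposition; same cost).


-- ===== PORT A =====
def pvMsgHarm : String := "I apologize, but I'm not able to provide a response to that request. Please feel free to rephrase your question or ask about something else. I'm here to help!"
def pvMsgPii : String := "For your security, I've withheld some information from my response. If you need specific details, please contact our support team directly. How else can I assist you today?"
def pvMsgPolicy : String := "I'm not able to provide advice on that topic. For specific guidance, please consult a qualified professional. Is there something else I can help you with?"
def pvMsgGeneric : String := "I apologize, but I'm unable to provide a complete response to your request. Please try rephrasing your question, or contact our support team for further assistance."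

-- Literal transliteration of A: three if/any branches in order, then the generic default.
def get_safe_fallback_response_py (blocked_reasons : List String) : String :=
  if blocked_reasons.any (fun r => PySem.Str.isIn "hate_speech" (PySem.Str.lower r) || PySem.Str.isIn "violence" (PySem.Str.lower r)) then
    pvMsgHarm
  else if blocked_reasons.any (fun r => PySem.Str.isIn "pii" (PySem.Str.lower r)) then
    pvMsgPii
  else if blocked_reasons.any (fun r => PySem.Str.isIn "policy" (PySem.Str.lower r)) then
    pvMsgPolicy
  else
    pvMsgGeneric

-- ===== PORT B =====
-- B (transliteration of Source B): per-reason severity rank, one fold taking the minimum, message table indexed by the result.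
def pvMessages : List String := [pvMsgHarm, pvMsgPii, pvMsgPolicy, pvMsgGeneric]

def pvSeverity (reason : String) : Nat :=
  let low := PySem.Str.lower reason
  if PySem.Str.isIn "hate_speech" low || PySem.Str.isIn "violence" low then 0
  else if PySem.Str.isIn "pii" low then 1
  else if PySem.Str.isIn "policy" low then 2
  else 3

def get_safe_fallback_response_py_alt (blocked_reasons : List String) : String :=
  let best := blocked_reasons.foldl (fun b r => min b (pvSeverity r)) 3
  -- _MESSAGES[best]: best is always 0..3, so the index is in range; .getD "" only totalises the lookup
  (PySem.List.pyGet? pvMessages (best : Int)).getD ""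

-- ===== PRECONDITION & SPEC =====
def Spec_get_safe_fallback_response_py (blocked_reasons : List String) (out : String) : Prop := out = get_safe_fallback_response_py_alt blocked_reasons
instance (blocked_reasons : List String) (out : String) : Decidable (Spec_get_safe_fallback_response_py blocked_reasons out) := by unfold Spec_get_safe_fallback_response_py; infer_instance

-- ===== CLAIM (what is proved, stated in full; the proofs are below) =====
def Claim_equal_get_safe_fallback_response_py : Prop := ∀ (blocked_reasons : List String), Dom_get_safe_fallback_response_py blocked_reasons → Spec_get_safe_fallback_response_py blocked_reasons (get_safe_fallback_response_py blocked_reasons)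

-- ===== LEMMAS AND PROOFS =====
def pvBest (l : List String) : Nat := l.foldl (fun b r => min b (pvSeverity r)) 3

theorem pvSeverity_le_three (r : String) : pvSeverity r ≤ 3 := by
  simp only [pvSeverity]; split_ifs <;> omega

theorem pvFoldl_min_shift (l : List String) (a : Nat) (h : a ≤ 3) :
    l.foldl (fun b r => min b (pvSeverity r)) a = min a (pvBest l) := by
  induction l generalizing a with
  | nil => simp [pvBest, Nat.min_eq_left h]
  | cons r t ih =>
    simp only [pvBest, List.foldl_cons]
    rw [ih _ (le_trans (Nat.min_le_left _ _) h), ih _ (Nat.min_le_left _ _)]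
    omega

theorem pvBest_cons (r : String) (t : List String) :
    pvBest (r :: t) = min (pvSeverity r) (pvBest t) := by
  have h := pvFoldl_min_shift t (min 3 (pvSeverity r)) (Nat.min_le_left _ _)
  simp only [pvBest, List.foldl_cons] at *
  rw [h]
  have := pvSeverity_le_three r
  omega

theorem pvBest_le_three (l : List String) : pvBest l ≤ 3 := by
  induction l with
  | nil => simp [pvBest]
  | cons r t ih => rw [pvBest_cons]; omega

theorem pvBest_le_iff (l : List String) (k : Nat) (hk : k < 3) :
    pvBest l ≤ k ↔ ∃ r ∈ l, pvSeverity r ≤ k := by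
  induction l with
  | nil => simp [pvBest]; omega
  | cons r t ih =>
    rw [pvBest_cons]
    simp only [List.mem_cons]
    constructor
    · intro h
      by_cases hc : pvSeverity r ≤ k
      · exact ⟨r, Or.inl rfl, hc⟩
      · have : pvBest t ≤ k := by omega
        obtain ⟨x, hx, hx'⟩ := ih.mp this; exact ⟨x, Or.inr hx, hx'⟩
    · rintro ⟨x, hx | hx, hx'⟩
      · subst hx; exact le_trans (Nat.min_le_left _ _) hx'
      · exact le_trans (Nat.min_le_right _ _) (ih.mpr ⟨x, hx, hx'⟩)

theorem pvSeverity_eq_zero_iff (r : String) :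
    pvSeverity r = 0 ↔ (PySem.Str.isIn "hate_speech" (PySem.Str.lower r) || PySem.Str.isIn "violence" (PySem.Str.lower r)) = true := by
  simp only [pvSeverity]
  split_ifs with h1 h2 h3
  · exact iff_of_true rfl h1
  · exact iff_of_false (fun h => h) h1
  · exact iff_of_false (fun h => h) h1
  · exact iff_of_false (fun h => h) h1

theorem pvSeverity_le_one_iff (r : String) :
    pvSeverity r ≤ 1 ↔ ((PySem.Str.isIn "hate_speech" (PySem.Str.lower r) || PySem.Str.isIn "violence" (PySem.Str.lower r)) = true ∨ PySem.Str.isIn "pii" (PySem.Str.lower r) = true) := by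
  simp only [pvSeverity]
  split_ifs with h1 h2 h3
  · exact iff_of_true (by omega) (Or.inl h1)
  · exact iff_of_true (by omega) (Or.inr h2)
  · exact iff_of_false (by omega) (by rintro (hc | hc); exacts [h1 hc, h2 hc])
  · exact iff_of_false (by omega) (by rintro (hc | hc); exacts [h1 hc, h2 hc])

theorem pvSeverity_le_two_iff (r : String) :
    pvSeverity r ≤ 2 ↔ ((PySem.Str.isIn "hate_speech" (PySem.Str.lower r) || PySem.Str.isIn "violence" (PySem.Str.lower r)) = true ∨ PySem.Str.isIn "pii" (PySem.Str.lower r) = true ∨ PySem.Str.isIn "policy" (PySem.Str.lower r) = true) := by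
  simp only [pvSeverity]
  split_ifs with h1 h2 h3
  · exact iff_of_true (by omega) (Or.inl h1)
  · exact iff_of_true (by omega) (Or.inr (Or.inl h2))
  · exact iff_of_true (by omega) (Or.inr (Or.inr h3))
  · exact iff_of_false (by omega) (by rintro (hc | hc | hc); exacts [h1 hc, h2 hc, h3 hc])

-- ===== VERDICT (by name: the statement is the Claim_ definition above) =====
theorem get_safe_fallback_response_py_spec : Claim_equal_get_safe_fallback_response_py := by
  intro l _
  show get_safe_fallback_response_py l = get_safe_fallback_response_py_alt l
  rw [get_safe_fallback_response_py_alt]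
  show _ = (PySem.List.pyGet? pvMessages ((pvBest l : Nat) : Int)).getD ""
  rw [get_safe_fallback_response_py]
  by_cases h0 : l.any (fun r => PySem.Str.isIn "hate_speech" (PySem.Str.lower r) || PySem.Str.isIn "violence" (PySem.Str.lower r)) = true
  · have hb : pvBest l = 0 := by
      have := (pvBest_le_iff l 0 (by omega)).mpr (by
        obtain ⟨r, hr, hr'⟩ := List.any_eq_true.mp h0
        exact ⟨r, hr, le_of_eq ((pvSeverity_eq_zero_iff r).mpr hr')⟩)
      omega
    rw [hb, if_pos h0]; rfl
  · by_cases h1 : l.any (fun r => PySem.Str.isIn "pii" (PySem.Str.lower r)) = true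
    · have hb : pvBest l = 1 := by
        have hle : pvBest l ≤ 1 := (pvBest_le_iff l 1 (by omega)).mpr (by
          obtain ⟨r, hr, hr'⟩ := List.any_eq_true.mp h1
          exact ⟨r, hr, (pvSeverity_le_one_iff r).mpr (Or.inr hr')⟩)
        have hne : ¬ pvBest l ≤ 0 := by
          intro h
          obtain ⟨r, hr, hr'⟩ := (pvBest_le_iff l 0 (by omega)).mp h
          exact h0 (List.any_eq_true.mpr ⟨r, hr, (pvSeverity_eq_zero_iff r).mp (Nat.le_zero.mp hr')⟩)
        omega
      rw [hb, if_neg h0, if_pos h1]; rfl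
    · by_cases h2 : l.any (fun r => PySem.Str.isIn "policy" (PySem.Str.lower r)) = true
      · have hb : pvBest l = 2 := by
          have hle : pvBest l ≤ 2 := (pvBest_le_iff l 2 (by omega)).mpr (by
            obtain ⟨r, hr, hr'⟩ := List.any_eq_true.mp h2
            exact ⟨r, hr, (pvSeverity_le_two_iff r).mpr (Or.inr (Or.inr hr'))⟩)
          have hne : ¬ pvBest l ≤ 1 := by
            intro h
            obtain ⟨r, hr, hr'⟩ := (pvBest_le_iff l 1 (by omega)).mp h
            rcases (pvSeverity_le_one_iff r).mp hr' with hc | hc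
            · exact h0 (List.any_eq_true.mpr ⟨r, hr, hc⟩)
            · exact h1 (List.any_eq_true.mpr ⟨r, hr, hc⟩)
          omega
        rw [hb, if_neg h0, if_neg h1, if_pos h2]; rfl
      · have hb : pvBest l = 3 := by
          have hle := pvBest_le_three l
          have hne : ¬ pvBest l ≤ 2 := by
            intro h
            obtain ⟨r, hr, hr'⟩ := (pvBest_le_iff l 2 (by omega)).mp h
            rcases (pvSeverity_le_two_iff r).mp hr' with hc | hc | hc
            · exact h0 (List.any_eq_true.mpr ⟨r, hr, hc⟩)
            · exact h1 (List.any_eq_true.mpr ⟨r, hr, hc⟩)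
            · exact h2 (List.any_eq_true.mpr ⟨r, hr, hc⟩)
          omega
        rw [hb, if_neg h0, if_neg h1, if_neg h2]; rfl
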